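-- pv_equiv track=rewrite | github.com/oss-materijali/vjezbe | SRC103-UUP/II.Kolokvij/warmup/10_vj2kol.py | function
-- ===== SOURCE A (Python) =====
-- def function(list_a):
--     list_b = []
--
--     for i in range(1, len(list_a)):
--         temp = True
--         for prev in list_a[:i]:
--             if list_a[i] % prev != 0:
--                 temp = False
--         if temp:
--             list_b.append(list_a[i])
--
--     return list_b
-- ===== SOURCE B (Python) =====
-- def _gcd(a, b):
--     while b:
--         a, b = b, a % b
--     return a
--
--
-- def function(list_a):
--     # One pass: keep a running (absolute) LCM of the prefix; an element is kept
--     # iff it is divisible by that LCM.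
--     list_b = []
--     if not list_a:
--         return list_b
--     lcm = abs(list_a[0])
--     for x in list_a[1:]:
--         if x % lcm == 0:
--             list_b.append(x)
--         lcm = 0 if x == 0 else lcm * abs(x) // _gcd(lcm, abs(x))
--     return list_b
-- ===== Notes on version B (the rewrite author's own statement) =====
-- stated objective: faster
-- what changed: Replaces the quadratic check of every element against its whole prefix by a single pass that maintains the running LCM of the prefix (absolute value) and tests one divisibility per element.
import Mathlib
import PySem

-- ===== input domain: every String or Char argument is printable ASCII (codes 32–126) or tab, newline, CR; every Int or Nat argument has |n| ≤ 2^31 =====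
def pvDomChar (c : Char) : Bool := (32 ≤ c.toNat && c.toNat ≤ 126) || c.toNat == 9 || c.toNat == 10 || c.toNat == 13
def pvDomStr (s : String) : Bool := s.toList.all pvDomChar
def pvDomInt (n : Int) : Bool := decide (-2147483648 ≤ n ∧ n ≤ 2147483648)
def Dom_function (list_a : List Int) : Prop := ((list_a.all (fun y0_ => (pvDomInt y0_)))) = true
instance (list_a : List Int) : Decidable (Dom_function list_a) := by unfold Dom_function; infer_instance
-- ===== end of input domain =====

-- B replaces A's quadratic prefix re-scan by a one-pass running LCM of the prefix (faster; proved equal where A returns).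

-- ===== PORT A =====
def function (list_a : List Int) : List Int :=
  (PySem.List.pyRange 1 (list_a.length : Int) 1).foldl
    (fun list_b i =>
      let temp := (PySem.List.slice list_a none (some i)).foldl
        (fun temp prev =>
          if PySem.Int.mod (PySem.List.pyGetD list_a i 0) prev ≠ 0 then false else temp) true
      if temp then list_b ++ [PySem.List.pyGetD list_a i 0] else list_b)
    []

-- ===== PORT B =====
-- termination fact for the Euclidean loop of Source B's _gcd (cited by pygcd's decreasing_by)
theorem pymod_natAbs_lt (a b : Int) (hb : ¬ b = 0) : (PySem.Int.mod a b).natAbs < b.natAbs := by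
  rcases lt_or_gt_of_ne hb with h | h
  · have h1 := PySem.Int.mod_neg_bounds a h
    omega
  · have h1 := PySem.Int.mod_nonneg a h
    have h2 := PySem.Int.mod_lt a h
    omega

-- Source B's _gcd: while b: a, b = b, a % b
def pygcd (a b : Int) : Int :=
  if hb : b = 0 then a else pygcd b (PySem.Int.mod a b)
termination_by b.natAbs
decreasing_by exact pymod_natAbs_lt a b hb

def function_alt (list_a : List Int) : List Int :=
  match list_a with
  | [] => []
  | a0 :: rest =>
    (rest.foldl
      (fun (s : List Int × Int) x =>
        ((if PySem.Int.mod x s.2 = 0 then s.1 ++ [x] else s.1),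
         if x = 0 then 0 else PySem.Int.floordiv (s.2 * |x|) (pygcd s.2 |x|)))
      ([], |a0|)).1

-- ===== PRECONDITION & SPEC =====
-- Pre_ excludes exactly the inputs on which A raises ZeroDivisionError (a zero before the
-- last position makes A compute x % 0); B raises there too.
def Pre_function (list_a : List Int) : Prop := (0 : Int) ∉ list_a.dropLast
instance (list_a : List Int) : Decidable (Pre_function list_a) := by unfold Pre_function; infer_instance
def pvWitness_function : List Int := [2, 4, 8, 3]

def Spec_function (list_a : List Int) (out : List Int) : Prop := out = function_alt list_a
instance (list_a : List Int) (out : List Int) : Decidable (Spec_function list_a out) := by unfold Spec_function; infer_instance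

-- ===== CLAIM (what is proved, stated in full; the proofs are below) =====
def Claim_equal_function : Prop := ∀ (list_a : List Int), Dom_function list_a → Pre_function list_a → Spec_function list_a (function list_a)

-- ===== LEMMAS AND PROOFS =====

-- common specification both loops are reduced to
def keepB (pref : List Int) (y : Int) : Bool := pref.all (fun p => decide (PySem.Int.mod y p = 0))

def specAux (pref rest : List Int) : List Int :=
  match rest with
  | [] => []
  | y :: t => (if keepB pref y then [y] else []) ++ specAux (pref ++ [y]) t

theorem keepB_append (pref : List Int) (x y : Int) :
    keepB (pref ++ [x]) y = (keepB pref y && decide (PySem.Int.mod y x = 0)) := by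
  simp [keepB]

-- Source B's gcd computes Int.gcd on nonnegative arguments
theorem pygcd_eq (a b : Int) (ha : 0 ≤ a) (hb : 0 ≤ b) : pygcd a b = (Int.gcd a b : Int) := by
  by_cases h0 : b = 0
  · subst h0
    rw [pygcd, dif_pos rfl]
    simp [Int.gcd, Int.natAbs_of_nonneg ha]
  · have hbpos : 0 < b := lt_of_le_of_ne hb (Ne.symm h0)
    rw [pygcd, dif_neg h0, PySem.Int.mod_eq_emod_of_pos hbpos,
        pygcd_eq b (a % b) hb (Int.emod_nonneg a h0)]
    congr 1
    rw [Int.emod_def, Int.gcd_sub_mul_left_right b a (a / b)]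
    exact Int.gcd_comm b a
termination_by b.natAbs
decreasing_by
  have h1 := Int.emod_nonneg a h0
  have h2 := Int.emod_lt_of_pos a hbpos
  omega

theorem pylcm_eq (l x : Int) (hl : 0 < l) :
    PySem.Int.floordiv (l * |x|) (pygcd l |x|) = ((Int.lcm l x : Nat) : Int) := by
  rw [pygcd_eq l |x| hl.le (abs_nonneg x)]
  have hg : Int.gcd l |x| = Nat.gcd l.natAbs x.natAbs := by
    simp [Int.gcd, Int.natAbs_abs]
  have hm : l * |x| = ((l.natAbs * x.natAbs : Nat) : Int) := by
    push_cast [Int.natCast_natAbs]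
    rw [abs_of_pos hl]
  rw [hg, hm, PySem.Int.floordiv_natCast, ← Nat.lcm_eq_mul_div,
      Int.lcm_eq_natAbs_lcm_natAbs]

theorem lcm_mod_iff (l x y : Int) :
    (PySem.Int.mod y ((Int.lcm l x : Nat) : Int) = 0) ↔
      (PySem.Int.mod y l = 0 ∧ PySem.Int.mod y x = 0) := by
  rw [PySem.Int.mod_eq_zero_iff_dvd, PySem.Int.mod_eq_zero_iff_dvd,
      PySem.Int.mod_eq_zero_iff_dvd, Int.lcm_eq_natAbs_lcm_natAbs,
      Int.ofNat_dvd_left, Nat.lcm_dvd_iff, Int.natAbs_dvd_natAbs, Int.natAbs_dvd_natAbs]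

-- the inner guard-fold of A is keepB
theorem foldl_guard (x : Int) (l : List Int) (b : Bool) :
    l.foldl (fun t prev => if PySem.Int.mod x prev ≠ 0 then false else t) b
      = (b && keepB l x) := by
  induction l generalizing b with
  | nil => simp [keepB]
  | cons p t ih =>
    rw [List.foldl_cons, ih]
    by_cases hc : PySem.Int.mod x p = 0 <;> simp [keepB, hc]

-- A's loop from index j equals specAux on (take j, drop j)
theorem A_loop (l : List Int) (j : Nat) (acc : List Int) (hj : j ≤ l.length) :
    (PySem.List.pyRange (j : Int) (l.length : Int) 1).foldl
      (fun list_b i =>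
        let temp := (PySem.List.slice l none (some i)).foldl
          (fun temp prev =>
            if PySem.Int.mod (PySem.List.pyGetD l i 0) prev ≠ 0 then false else temp) true
        if temp then list_b ++ [PySem.List.pyGetD l i 0] else list_b)
      acc
    = acc ++ specAux (l.take j) (l.drop j) := by
  by_cases hlt : j < l.length
  · rw [PySem.List.pyRange_one_cons (by exact_mod_cast hlt), List.foldl_cons]
    have hget : PySem.List.pyGetD l (j : Int) 0 = l[j] := by
      rw [PySem.List.pyGetD_natCast]
      exact List.getD_eq_getElem l 0 hlt
    have hslice : PySem.List.slice l none (some (j : Int)) = l.take j :=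
      PySem.List.slice_to_natCast l j
    have hcast : ((j : Int) + 1) = ((j + 1 : Nat) : Int) := by push_cast; ring
    rw [hcast, A_loop l (j + 1) _ hlt]
    simp only [hget, hslice, foldl_guard, Bool.true_and]
    rw [List.drop_eq_getElem_cons hlt, specAux, List.take_add_one,
        List.getElem?_eq_getElem hlt]
    by_cases hk : keepB (l.take j) l[j] = true
    · simp [hk]
    · simp [Bool.not_eq_true] at hk
      simp [hk]
  · have hj' : j = l.length := le_antisymm hj (not_lt.mp hlt)
    subst hj'
    rw [PySem.List.pyRange_one_eq_nil (le_refl _), List.foldl_nil,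
        List.drop_length, List.take_length, specAux, List.append_nil]
termination_by l.length - j
decreasing_by omega

-- B's loop with a positive running lcm that characterises keepB
theorem B_loop (rest : List Int) (pref : List Int) (L : Int) (acc : List Int)
    (hL : 0 < L)
    (hiff : ∀ y, (PySem.Int.mod y L = 0) ↔ keepB pref y = true)
    (hz : (0 : Int) ∉ rest.dropLast) :
    (rest.foldl
      (fun (s : List Int × Int) x =>
        ((if PySem.Int.mod x s.2 = 0 then s.1 ++ [x] else s.1),
         if x = 0 then 0 else PySem.Int.floordiv (s.2 * |x|) (pygcd s.2 |x|)))
      (acc, L)).1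
    = acc ++ specAux pref rest := by
  induction rest generalizing pref L acc with
  | nil => simp [specAux]
  | cons x t ih =>
    rw [List.foldl_cons]
    have hacc : (if PySem.Int.mod x L = 0 then acc ++ [x] else acc)
        = acc ++ (if keepB pref x then [x] else []) := by
      by_cases hk : PySem.Int.mod x L = 0
      · simp [hk, (hiff x).mp hk]
      · have hk2 : keepB pref x = false := by
          rcases Bool.eq_false_or_eq_true (keepB pref x) with h | h
          · exact absurd ((hiff x).mpr h) hk
          · exact h
        simp [hk, hk2]
    cases t with
    | nil => simp only [List.foldl_nil, specAux, hacc, List.append_nil]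
    | cons b t' =>
      have hx : x ≠ 0 := by
        intro h; subst h; exact hz (by simp)
      have hz' : (0 : Int) ∉ (b :: t').dropLast := by
        intro h; exact hz (by simp [h])
      have hL' : (if x = 0 then 0 else PySem.Int.floordiv (L * |x|) (pygcd L |x|))
          = ((Int.lcm L x : Nat) : Int) := by
        rw [if_neg hx, pylcm_eq L x hL]
      have hLpos : (0 : Int) < ((Int.lcm L x : Nat) : Int) := by
        have : Int.lcm L x ≠ 0 := Int.lcm_ne_zero (by omega) hx
        exact_mod_cast Nat.pos_of_ne_zero this
      rw [specAux, hL', ih (pref ++ [x]) _ _ hLpos ?_ hz', hacc, List.append_assoc]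
      intro y
      rw [lcm_mod_iff, keepB_append, Bool.and_eq_true, hiff y, decide_eq_true_eq]

-- ===== VERDICT (by name: the statement is the Claim_ definition above) =====
theorem function_spec : Claim_equal_function := by
  intro l _dom hpre
  unfold Spec_function
  match l with
  | [] => rfl
  | [a0] => rfl
  | a0 :: x :: t =>
    have ha0 : a0 ≠ 0 := by
      intro h; subst h; exact hpre (by simp)
    have hz : (0 : Int) ∉ (x :: t).dropLast := by
      intro h; exact hpre (by simp [h])
    have hA : function (a0 :: x :: t) = specAux [a0] (x :: t) := by
      have := A_loop (a0 :: x :: t) 1 [] (by simp)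
      simpa [function] using this
    have hB : function_alt (a0 :: x :: t) = specAux [a0] (x :: t) := by
      have habs : (0 : Int) < |a0| := abs_pos.mpr ha0
      have hiff : ∀ y, (PySem.Int.mod y |a0| = 0) ↔ keepB [a0] y = true := by
        intro y
        rw [PySem.Int.mod_eq_zero_iff_dvd]
        simp [keepB, PySem.Int.mod_eq_zero_iff_dvd, abs_dvd]
      have := B_loop (x :: t) [a0] |a0| [] habs hiff hz
      simpa [function_alt] using this
    rw [hA, hB]
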